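-- pv_equiv track=rewrite | github.com/regnou/z_algo | tryalgo-master/tryalgo/max_interval_intersec.py | max_interval_intersec
-- ===== SOURCE A (Python) =====
-- def max_interval_intersec(S):
--     """determine a value that is contained in a largest number of given intervals
--
--     :param S: list of half open intervals
--     :complexity: O(n log n), where n = len(S)
--     """
--     B = ([(left,  +1) for left, right in S] +
--          [(right, -1) for left, right in S])
--     B.sort()
--     c = 0
--     best = (c, None)
--     for x, d in B:
--         c += d
--         if best[0] < c:
--             best = (c, x)
--     return best
-- ===== SOURCE B (Python) =====
-- def max_interval_intersec(S):
--     """determine a value that is contained in a largest number of given intervals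
--
--     :param S: list of half open intervals
--     """
--     best = (0, None)
--     for x in sorted(set(left for left, right in S)):
--         c = sum((left <= x) - (right <= x) for left, right in S)
--         if best[0] < c:
--             best = (c, x)
--     return best
-- ===== Notes on version B (the rewrite author's own statement) =====
-- stated objective: alternative
-- what changed: Drops A's sort-and-sweep over 2n signed endpoint events entirely: B iterates the sorted distinct left endpoints and recomputes the coverage at each candidate directly by one counting pass over S (starts <= x minus ends <= x), keeping the first strict maximum.
import Mathlib
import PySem

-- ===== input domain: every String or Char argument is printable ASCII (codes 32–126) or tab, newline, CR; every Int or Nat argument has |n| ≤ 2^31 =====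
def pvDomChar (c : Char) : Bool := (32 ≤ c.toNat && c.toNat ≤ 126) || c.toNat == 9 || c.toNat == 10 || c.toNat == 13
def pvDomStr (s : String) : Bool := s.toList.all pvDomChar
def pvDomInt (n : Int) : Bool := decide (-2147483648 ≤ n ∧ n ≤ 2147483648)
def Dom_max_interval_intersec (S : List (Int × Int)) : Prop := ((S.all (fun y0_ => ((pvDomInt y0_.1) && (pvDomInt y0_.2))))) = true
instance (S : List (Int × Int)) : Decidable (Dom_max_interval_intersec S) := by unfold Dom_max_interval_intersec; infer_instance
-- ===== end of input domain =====

-- B replaces A's sorted sweep over 2n signed endpoint events by direct evaluation: for each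
-- distinct left endpoint in increasing order it recounts the coverage there in one pass over S
-- (objective: alternative — no event list, no running sweep counter across events).

-- ===== PORT A =====
-- A's loop body ('c += d; if best[0] < c: best = (c, x)') as a named step function.
def pvStepA (st : Int × (Int × Option Int)) (xd : Int × Int) : Int × (Int × Option Int) :=
  let c := st.1 + xd.2
  (c, if st.2.1 < c then (c, some xd.1) else st.2)

def max_interval_intersec (S : List (Int × Int)) : Int × Option Int :=
  let B := S.map (fun p => (p.1, (1 : Int))) ++ S.map (fun p => (p.2, (-1 : Int)))
  let Bs := PySem.List.sorted2 B (fun e => e.1) (fun e => e.2) false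
  (Bs.foldl pvStepA ((0 : Int), ((0 : Int), (none : Option Int)))).2

-- ===== PORT B =====
-- Source B: 'for x in sorted(set(left for left, right in S)):
--          c = sum((left <= x) - (right <= x) for left, right in S); if best[0] < c: best = (c, x)'
def max_interval_intersec_alt (S : List (Int × Int)) : Int × Option Int :=
  (PySem.List.sorted (PySem.Set.ofList (S.map (fun p => p.1))) (fun x => x) false).foldl
    (fun best x =>
      let c := S.foldl
        (fun a p => a + ((if p.1 ≤ x then (1 : Int) else 0) - (if p.2 ≤ x then (1 : Int) else 0))) 0
      if best.1 < c then (c, some x) else best)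
    ((0 : Int), (none : Option Int))

-- ===== PRECONDITION & SPEC =====
def Spec_max_interval_intersec (S : List (Int × Int)) (out : Int × Option Int) : Prop := out = max_interval_intersec_alt S
instance (S : List (Int × Int)) (out : Int × Option Int) : Decidable (Spec_max_interval_intersec S out) := by unfold Spec_max_interval_intersec; infer_instance

-- ===== CLAIM (what is proved, stated in full; the proofs are below) =====
def Claim_equal_max_interval_intersec : Prop := ∀ (S : List (Int × Int)), Dom_max_interval_intersec S → Spec_max_interval_intersec S (max_interval_intersec S)

-- ===== LEMMAS AND PROOFS =====

-- coverage at x as counted by B: starts ≤ x minus ends ≤ x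
def pvF (S : List (Int × Int)) (x : Int) : Int :=
  (((S.map Prod.fst).countP (fun l => decide (l ≤ x)) : Nat) : Int)
    - (((S.map Prod.snd).countP (fun r => decide (r ≤ x)) : Nat) : Int)

-- B's per-candidate step, with the coverage function abstracted
def pvStep' (f : Int → Int) (best : Int × Option Int) (x : Int) : Int × Option Int :=
  if best.1 < f x then (f x, some x) else best

-- A's reduced per-coordinate step (running counter with net delta)
def pvStepN (mf pf : Int → Nat) (st : Int × (Int × Option Int)) (x : Int) :
    Int × (Int × Option Int) :=
  let c := st.1 + ((pf x : Int) - (mf x : Int))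
  (c, if st.2.1 < c then (c, some x) else st.2)

-- Python's lexicographic '<' on int pairs, as sorted2's comparison
def pvLex (a b : Int × Int) : Bool := decide (a.1 < b.1) || (!decide (b.1 < a.1) && decide (a.2 < b.2))

theorem pv_sorted2_eq (xs : List (Int × Int)) :
    PySem.List.sorted2 xs (fun e => e.1) (fun e => e.2) false
      = xs.foldl (fun acc x => PySem.List.insertBy pvLex x acc) [] := rfl

theorem pv_pairwise_insertBy {α : Type} (before : α → α → Bool)
    (hasym : ∀ a b, before a b = true → before b a = false)
    (htrans : ∀ a b c, before b a = false → before c b = false → before c a = false)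
    (x : α) (ys : List α) (h : ys.Pairwise (fun a b => before b a = false)) :
    (PySem.List.insertBy before x ys).Pairwise (fun a b => before b a = false) := by
  induction ys with
  | nil => simp [PySem.List.insertBy]
  | cons y ys ih =>
    rw [List.pairwise_cons] at h
    obtain ⟨hy, hys⟩ := h
    by_cases hb : before x y = true
    · rw [PySem.List.insertBy, if_pos hb]
      refine List.pairwise_cons.mpr ⟨?_, List.pairwise_cons.mpr ⟨hy, hys⟩⟩
      intro a ha
      rcases List.mem_cons.mp ha with rfl | ha
      · exact hasym _ _ hb
      · exact htrans _ _ _ (hasym _ _ hb) (hy a ha)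
    · rw [PySem.List.insertBy, if_neg hb]
      refine List.pairwise_cons.mpr ⟨?_, ih hys⟩
      intro a ha
      rcases (PySem.List.mem_insertBy before x a ys).mp ha with rfl | ha
      · simpa using hb
      · exact hy a ha

theorem pv_pairwise_foldl_insertBy {α : Type} (before : α → α → Bool)
    (hasym : ∀ a b, before a b = true → before b a = false)
    (htrans : ∀ a b c, before b a = false → before c b = false → before c a = false)
    (xs : List α) (acc : List α) (h : acc.Pairwise (fun a b => before b a = false)) :
    (xs.foldl (fun acc x => PySem.List.insertBy before x acc) acc).Pairwise
      (fun a b => before b a = false) := by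
  induction xs generalizing acc with
  | nil => exact h
  | cons x xs ih =>
    exact ih _ (pv_pairwise_insertBy before hasym htrans x acc h)

theorem pvLex_asym : ∀ a b, pvLex a b = true → pvLex b a = false := by
  intro a b
  simp only [pvLex, Bool.or_eq_true, Bool.or_eq_false_iff, Bool.and_eq_true,
    Bool.and_eq_false_iff, Bool.not_eq_true', Bool.not_eq_false', decide_eq_true_eq,
    decide_eq_false_iff_not]
  omega

theorem pvLex_trans : ∀ a b c : Int × Int, pvLex b a = false → pvLex c b = false → pvLex c a = false := by
  intro a b c
  simp only [pvLex, Bool.or_eq_false_iff, Bool.and_eq_false_iff,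
    Bool.not_eq_false', decide_eq_true_eq, decide_eq_false_iff_not]
  omega

theorem pvLex_antisymm : ∀ a b : Int × Int, pvLex b a = false → pvLex a b = false → a = b := by
  intro a b ha hb
  simp only [pvLex, Bool.or_eq_false_iff, Bool.and_eq_false_iff,
    Bool.not_eq_false', decide_eq_true_eq, decide_eq_false_iff_not] at ha hb
  have : a.1 = b.1 ∧ a.2 = b.2 := by omega
  exact Prod.ext this.1 this.2

-- fold of a run of -1 events: c drops, best unchanged
theorem pv_fold_rep_neg (m : Nat) (x c b : Int) (w : Option Int) (h : c ≤ b) :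
    (List.replicate m (x, (-1 : Int))).foldl pvStepA (c, (b, w)) = (c - m, (b, w)) := by
  induction m generalizing c with
  | zero => simp
  | succ m ih =>
    rw [List.replicate_succ, List.foldl_cons]
    have hstep : pvStepA (c, (b, w)) (x, -1) = (c + -1, (b, w)) := by
      simp only [pvStepA]
      rw [if_neg (by omega)]
    rw [hstep, ih (c + -1) (by omega)]
    refine Prod.ext ?_ rfl
    push_cast
    omega

-- fold of a run of +1 events: c rises, best updated iff the end value beats b
theorem pv_fold_rep_pos (p : Nat) (x c b : Int) (w : Option Int) (h : c ≤ b) :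
    (List.replicate p (x, (1 : Int))).foldl pvStepA (c, (b, w))
      = (c + p, if b < c + p then (c + p, some x) else (b, w)) := by
  induction p generalizing c b w with
  | zero =>
    simp only [List.replicate_zero, List.foldl_nil, Nat.cast_zero, add_zero]
    rw [if_neg (by omega)]
  | succ p ih =>
    rw [List.replicate_succ, List.foldl_cons]
    by_cases hb : b < c + 1
    · have hstep : pvStepA (c, (b, w)) (x, 1) = (c + 1, (c + 1, some x)) := by
        simp only [pvStepA]
        rw [if_pos (by omega)]
      rw [hstep, ih (c + 1) (c + 1) (some x) (le_refl _)]
      push_cast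
      split_ifs <;>
        first
          | (exfalso; omega)
          | (simp only [Prod.mk.injEq, and_true]; omega)
    · have hstep : pvStepA (c, (b, w)) (x, 1) = (c + 1, (b, w)) := by
        simp only [pvStepA]
        rw [if_neg (by omega)]
      rw [hstep, ih (c + 1) b w (by omega)]
      push_cast
      split_ifs <;>
        first
          | (exfalso; omega)
          | (simp only [Prod.mk.injEq, and_true]; omega)

-- A's fold over the grouped event list is the per-coordinate fold
theorem pv_fold_flatMap (X : List Int) (mf pf : Int → Nat) (c b : Int) (w : Option Int)
    (h : c ≤ b) :
    ((X.flatMap (fun x => List.replicate (mf x) (x, (-1 : Int)) ++ List.replicate (pf x) (x, (1 : Int)))).foldl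
      pvStepA (c, (b, w)))
      = X.foldl (pvStepN mf pf) (c, (b, w)) := by
  induction X generalizing c b w with
  | nil => simp
  | cons x X ih =>
    rw [List.flatMap_cons, List.foldl_append, List.foldl_append, List.foldl_cons,
        pv_fold_rep_neg (mf x) x c b w h,
        pv_fold_rep_pos (pf x) x (c - (mf x : Int)) b w (by omega)]
    have he : c + (((pf x : Nat) : Int) - ((mf x : Nat) : Int))
        = c - ((mf x : Nat) : Int) + ((pf x : Nat) : Int) := by omega
    by_cases hb : b < c - (mf x : Int) + (pf x : Int)
    · rw [if_pos hb]
      have h2 : pvStepN mf pf (c, (b, w)) x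
          = (c - (mf x : Int) + (pf x : Int), (c - (mf x : Int) + (pf x : Int), some x)) := by
        simp only [pvStepN]
        rw [he, if_pos hb]
      rw [h2, ih _ _ _ (le_refl _)]
    · rw [if_neg hb]
      have h2 : pvStepN mf pf (c, (b, w)) x
          = (c - (mf x : Int) + (pf x : Int), (b, w)) := by
        simp only [pvStepN]
        rw [he, if_neg hb]
      rw [h2, ih _ _ _ (by omega)]

-- counting events in the grouped list
theorem pv_count_flatMap (X : List Int) (g : Int → List (Int × Int))
    (hg : ∀ x, ∀ e ∈ g x, e.1 = x) (hnd : X.Nodup) (q : Int × Int) :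
    ((X.flatMap g).count q) = if q.1 ∈ X then (g q.1).count q else 0 := by
  induction X with
  | nil => simp
  | cons x X ih =>
    rw [List.nodup_cons] at hnd
    rw [List.flatMap_cons, List.count_append, ih hnd.2]
    by_cases hq : q.1 = x
    · rw [if_neg (hq ▸ hnd.1), if_pos (by simp [hq])]
      subst hq
      omega
    · have h0 : (g x).count q = 0 :=
        List.count_eq_zero.mpr (fun hmem => hq (hg x q hmem))
      rw [h0]
      by_cases hm : q.1 ∈ X
      · rw [if_pos hm, if_pos (List.mem_cons_of_mem _ hm)]
        omega
      · rw [if_neg hm, if_neg (by simp [hq, hm])]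

theorem pv_count_map_pair (S : List Int) (v y d : Int) :
    ((S.map (fun x => (x, v))).count (y, d)) = if d = v then S.count y else 0 := by
  induction S with
  | nil => simp
  | cons a S ih =>
    rw [List.map_cons, List.count_cons, List.count_cons, ih]
    by_cases hd : d = v <;> by_cases ha : y = a <;>
      simp [hd, ha, Prod.ext_iff] <;> omega

-- endpoint multiplicity functions used by the equivalence proof
def pvPF (S : List (Int × Int)) (y : Int) : Nat := (S.map Prod.fst).count y
def pvMF (S : List (Int × Int)) (y : Int) : Nat := (S.map Prod.snd).count y

-- sum of an indicator over a nodup list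
theorem pv_sum_indicator (a : Int) (M : List Int) (hnd : M.Nodup) :
    (M.map (fun y => if a == y then (1 : Int) else 0)).sum = if a ∈ M then 1 else 0 := by
  induction M with
  | nil => simp
  | cons b M ih =>
    rw [List.nodup_cons] at hnd
    rw [List.map_cons, List.sum_cons, ih hnd.2]
    by_cases hab : a = b
    · subst hab
      simp [hnd.1]
    · by_cases hm : a ∈ M <;> simp [hab, hm]

-- Σ_{y ∈ X, p y} (count of y in L) = countP p L, when every element of L lies in the nodup X
theorem pv_sum_count (p : Int → Bool) (L : List Int) :
    ∀ (X : List Int), X.Nodup → (∀ a ∈ L, a ∈ X) →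
    ((X.filter p).map (fun y => ((L.count y : Nat) : Int))).sum = ((L.countP p : Nat) : Int) := by
  induction L with
  | nil => intro X _ _; simp
  | cons a L ih =>
    intro X hnd hsub
    have hstep : ((X.filter p).map (fun y => (((a :: L).count y : Nat) : Int))).sum
        = ((X.filter p).map (fun y => ((L.count y : Nat) : Int))).sum
          + ((X.filter p).map (fun y => if a == y then (1 : Int) else 0)).sum := by
      rw [← List.sum_map_add]
      refine congrArg List.sum (List.map_congr_left ?_)
      intro y _
      rw [List.count_cons]
      push_cast
      omega
    rw [hstep, ih X hnd (fun b hb => hsub b (List.mem_cons_of_mem _ hb)),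
        pv_sum_indicator a _ (hnd.filter p), List.countP_cons]
    have hax : a ∈ X := hsub a List.mem_cons_self
    by_cases hpa : p a = true
    · rw [if_pos (List.mem_filter.mpr ⟨hax, hpa⟩), if_pos hpa]
      push_cast
      omega
    · rw [if_neg (fun hmem => hpa (List.mem_filter.mp hmem).2), if_neg hpa]
      push_cast
      omega

-- a sum of differences splits
theorem pv_sum_sub (M : List Int) (g h : Int → Int) :
    (M.map (fun y => g y - h y)).sum = (M.map g).sum - (M.map h).sum := by
  induction M with
  | nil => simp
  | cons b M ih => simp [ih]; omega

-- MASTER LEMMA: A's running-delta sweep over all sorted distinct coordinates equals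
-- B's direct-count pass over the coordinates kept by P, provided the prefix sums of the
-- deltas realise f and the coordinates dropped by P have non-positive delta.
theorem pv_master (f : Int → Int) (P : Int → Bool) (mf pf : Int → Nat) :
    ∀ (X : List Int) (c : Int) (best : Int × Option Int),
    X.Pairwise (· < ·) →
    (∀ x ∈ X, c + ((X.filter (fun y => decide (y ≤ x))).map
        (fun y => ((pf y : Nat) : Int) - ((mf y : Nat) : Int))).sum = f x) →
    c ≤ best.1 →
    (∀ x ∈ X, P x = false → ((pf x : Nat) : Int) - ((mf x : Nat) : Int) ≤ 0) →
    (X.foldl (pvStepN mf pf) (c, best)).2 = (X.filter P).foldl (pvStep' f) best := by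
  intro X
  induction X with
  | nil => intro c best _ _ _ _; simp
  | cons x X ih =>
    intro c best hsort hsum hc hneg
    rw [List.pairwise_cons] at hsort
    obtain ⟨hlt, hX⟩ := hsort
    have hfx : c + (((pf x : Nat) : Int) - ((mf x : Nat) : Int)) = f x := by
      have h := hsum x List.mem_cons_self
      rw [List.filter_cons, if_pos (by simp)] at h
      rw [List.filter_eq_nil_iff.mpr (fun a ha hle => absurd (of_decide_eq_true hle) (not_le.mpr (hlt a ha)))] at h
      simpa using h
    set c' := c + (((pf x : Nat) : Int) - ((mf x : Nat) : Int)) with hc'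
    have hstep : pvStepN mf pf (c, best) x
        = (c', if best.1 < c' then (c', some x) else best) := rfl
    have hsum' : ∀ z ∈ X, c' + ((X.filter (fun y => decide (y ≤ z))).map
        (fun y => ((pf y : Nat) : Int) - ((mf y : Nat) : Int))).sum = f z := by
      intro z hz
      have h := hsum z (List.mem_cons_of_mem _ hz)
      rw [List.filter_cons, if_pos (by simp [(hlt z hz).le])] at h
      rw [List.map_cons, List.sum_cons] at h
      rw [hc']
      omega
    rw [List.foldl_cons, hstep, List.filter_cons]
    by_cases hP : P x = true
    · rw [if_pos hP, List.foldl_cons]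
      have hbest : (if best.1 < c' then (c', some x) else best) = pvStep' f best x := by
        rw [pvStep', ← hfx]
      rw [hbest]
      refine ih c' (pvStep' f best x) hX hsum' ?_ (fun z hz => hneg z (List.mem_cons_of_mem _ hz))
      rw [pvStep', ← hfx]
      split_ifs <;> omega
    · rw [if_neg hP]
      have hdrop : c' ≤ best.1 := by
        have := hneg x List.mem_cons_self (by simpa using hP)
        omega
      rw [if_neg (by omega)]
      exact ih c' best hX hsum' hdrop (fun z hz => hneg z (List.mem_cons_of_mem _ hz))

-- B's inner one-pass sum computes pvF
theorem pv_inner (S : List (Int × Int)) (x : Int) :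
    ∀ a0 : Int, S.foldl
        (fun a p => a + ((if p.1 ≤ x then (1 : Int) else 0) - (if p.2 ≤ x then (1 : Int) else 0))) a0
      = a0 + pvF S x := by
  induction S with
  | nil => intro a0; simp [pvF]
  | cons p S ih =>
    intro a0
    rw [List.foldl_cons, ih]
    simp only [pvF, List.map_cons, List.countP_cons]
    by_cases h1 : p.1 ≤ x <;> by_cases h2 : p.2 ≤ x <;>
      simp [h1, h2] <;> omega

-- assembling the equivalence
theorem pv_main (S : List (Int × Int)) :
    max_interval_intersec S = max_interval_intersec_alt S := by
  set X := PySem.List.sorted (PySem.Set.ofList (S.map Prod.fst ++ S.map Prod.snd)) (fun x => x) false with hXdef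
  have hmemX : ∀ y, y ∈ X ↔ y ∈ S.map Prod.fst ++ S.map Prod.snd := by
    intro y
    rw [hXdef, PySem.List.mem_sorted, PySem.Set.mem_ofList]
  have hXlt : X.Pairwise (· < ·) := PySem.List.sorted_ofList_pairwise_lt _
  have hXnodup : X.Nodup := hXlt.imp ne_of_lt
  -- step 1: A's sorted event list is the grouped flatMap over X
  have hg : ∀ x : Int, ∀ e ∈ (List.replicate (pvMF S x) (x, (-1:Int)) ++
      List.replicate (pvPF S x) (x, (1:Int))), e.1 = x := by
    intro x e he
    rcases List.mem_append.mp he with h | h <;> rw [(List.mem_replicate.mp h).2]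
  have hzero : ∀ y, y ∉ X → pvPF S y = 0 ∧ pvMF S y = 0 := by
    intro y hy
    rw [hmemX, List.mem_append] at hy
    push_neg at hy
    exact ⟨List.count_eq_zero.mpr hy.1, List.count_eq_zero.mpr hy.2⟩
  have hstep1 : PySem.List.sorted2
      (S.map (fun p => (p.1, (1:Int))) ++ S.map (fun p => (p.2, (-1:Int))))
      (fun e => e.1) (fun e => e.2) false
      = X.flatMap
          (fun x => List.replicate (pvMF S x) (x, (-1:Int)) ++ List.replicate (pvPF S x) (x, (1:Int))) := by
    apply List.eq_of_perm_of_sorted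
    · exact fun a b _ _ h1 h2 => pvLex_antisymm a b h1 h2
    · rw [pv_sorted2_eq]
      exact pv_pairwise_foldl_insertBy pvLex pvLex_asym pvLex_trans _ [] List.Pairwise.nil
    · rw [List.flatMap_def, List.pairwise_flatten]
      constructor
      · intro l hl
        obtain ⟨x, hx, rfl⟩ := List.mem_map.mp hl
        rw [List.pairwise_append]
        refine ⟨List.pairwise_replicate.mpr (Or.inr (by simp [pvLex])),
                List.pairwise_replicate.mpr (Or.inr (by simp [pvLex])), ?_⟩
        intro a ha b hb
        rw [(List.mem_replicate.mp ha).2, (List.mem_replicate.mp hb).2]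
        simp [pvLex]
      · rw [List.pairwise_map]
        refine hXlt.imp ?_
        intro x y hxy a ha b hb
        have ha1 : a.1 = x := by
          rcases List.mem_append.mp ha with h | h <;> rw [(List.mem_replicate.mp h).2]
        have hb1 : b.1 = y := by
          rcases List.mem_append.mp hb with h | h <;> rw [(List.mem_replicate.mp h).2]
        simp only [pvLex, ha1, hb1, Bool.or_eq_false_iff, Bool.and_eq_false_iff,
          Bool.not_eq_false', decide_eq_true_eq, decide_eq_false_iff_not]
        omega
    · refine (PySem.List.sorted2_perm _ _ _ _).trans (List.perm_iff_count.mpr ?_)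
      intro q
      obtain ⟨y, dd⟩ := q
      rw [List.count_append]
      have e1 : S.map (fun p => (p.1, (1:Int))) = (S.map Prod.fst).map (fun x => (x, (1:Int))) := by
        rw [List.map_map]; rfl
      have e2 : S.map (fun p => (p.2, (-1:Int))) = (S.map Prod.snd).map (fun x => (x, (-1:Int))) := by
        rw [List.map_map]; rfl
      rw [e1, e2, pv_count_map_pair, pv_count_map_pair,
          pv_count_flatMap _ _ hg hXnodup]
      by_cases hmem : (y, dd).1 ∈ X
      · rw [if_pos hmem, List.count_append, List.count_replicate, List.count_replicate]
        simp only [pvPF, pvMF, beq_iff_eq, Prod.mk.injEq, true_and]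
        by_cases h1 : dd = 1
        · rw [if_pos h1, if_neg (by omega), if_neg (by omega : ¬ (-1 : Int) = dd), if_pos (by omega : (1 : Int) = dd)]
          omega
        · by_cases h2 : dd = -1
          · rw [if_neg h1, if_pos h2, if_pos (by omega : (-1 : Int) = dd), if_neg (by omega : ¬ (1 : Int) = dd)]
            omega
          · rw [if_neg h1, if_neg h2, if_neg (by omega : ¬ (-1 : Int) = dd), if_neg (by omega : ¬ (1 : Int) = dd)]
      · rw [if_neg hmem]
        obtain ⟨hz1, hz2⟩ := hzero y hmem
        simp only [pvPF, pvMF] at hz1 hz2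
        simp [hz1, hz2]
  -- step 2: prefix sums of the net deltas along X realise pvF
  have hsum : ∀ x ∈ X, (0 : Int) + ((X.filter (fun y => decide (y ≤ x))).map
      (fun y => ((pvPF S y : Nat) : Int) - ((pvMF S y : Nat) : Int))).sum = pvF S x := by
    intro x _
    simp only [pvPF, pvMF]
    rw [zero_add, pv_sum_sub, pvF]
    rw [pv_sum_count (fun y => decide (y ≤ x)) (S.map Prod.fst) X hXnodup
          (fun a ha => (hmemX a).mpr (List.mem_append.mpr (Or.inl ha))),
        pv_sum_count (fun y => decide (y ≤ x)) (S.map Prod.snd) X hXnodup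
          (fun a ha => (hmemX a).mpr (List.mem_append.mpr (Or.inr ha)))]
  -- step 3: coordinates that are no left endpoint have non-positive delta
  have hneg : ∀ x ∈ X, ((S.map Prod.fst).contains x) = false →
      ((pvPF S x : Nat) : Int) - ((pvMF S x : Nat) : Int) ≤ 0 := by
    intro x _ hx
    have h0 : pvPF S x = 0 := List.count_eq_zero.mpr (by simpa using hx)
    rw [h0]
    simp
  -- step 4: the kept coordinates are exactly B's sorted distinct left endpoints
  have hfilter : X.filter (fun x => (S.map Prod.fst).contains x)
      = PySem.List.sorted (PySem.Set.ofList (S.map (fun p => p.1))) (fun x => x) false := by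
    have hperm : (X.filter (fun x => (S.map Prod.fst).contains x)).Perm
        (PySem.Set.ofList (S.map (fun p => p.1))) := by
      apply List.perm_of_nodup_nodup_toFinset_eq ((hXlt.filter _).imp ne_of_lt)
        (PySem.Set.nodup_ofList _)
      ext a
      simp only [List.mem_toFinset, PySem.Set.mem_ofList, List.mem_filter, hmemX,
        List.mem_append, List.contains_iff_mem, List.mem_map]
      constructor
      · rintro ⟨-, h⟩
        exact h
      · intro h
        exact ⟨Or.inl (by simpa using h), by simpa using h⟩
    exact (PySem.List.sorted_eq_of_perm_of_pairwise_lt _ _ (fun x => x) hperm (hXlt.filter _)).symm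
  -- step 5: B's fold body is pvStep' (pvF S)
  have hbody : (fun (best : Int × Option Int) (x : Int) =>
      let c := S.foldl
        (fun a p => a + ((if p.1 ≤ x then (1 : Int) else 0) - (if p.2 ≤ x then (1 : Int) else 0))) 0
      if best.1 < c then (c, some x) else best) = pvStep' (pvF S) := by
    funext best x
    simp only [pv_inner S x 0, zero_add, pvStep']
  -- put the pieces together
  rw [max_interval_intersec, max_interval_intersec_alt, hbody, ← hfilter]
  rw [hstep1, pv_fold_flatMap X (pvMF S) (pvPF S) 0 0 none le_rfl]
  exact pv_master (pvF S) (fun x => (S.map Prod.fst).contains x) (pvMF S) (pvPF S) X 0 (0, none)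
    hXlt hsum le_rfl hneg

-- ===== VERDICT (by name: the statement is the Claim_ definition above) =====
theorem max_interval_intersec_spec : Claim_equal_max_interval_intersec := by
  intro S _
  exact pv_main S
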